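-- pv_equiv track=rewrite | github.com/Dev-2A/Offline-RAG-Benchmark-Runner | src/obrbr/reporting.py | _ordered_headers
-- ===== SOURCE A (Python) =====
-- def _ordered_headers(rows: list[dict[str, object]]) -> list[str]:
--     if not rows:
--         return []
--
--     keys = set()
--     for r in rows:
--         keys.update(r.keys())
--
--     preferred = ["index", "model", "queries", "winner", "error"]
--     cols: list[str] = [k for k in preferred if k in keys]
--
--     rest = sorted([k for k in keys if k not in cols])
--     cols.extend(rest)
--     return cols
-- ===== SOURCE B (Python) =====
-- def _ordered_headers(rows: list[dict[str, object]]) -> list[str]: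
--     keys = {k for r in rows for k in r}
--     rank = {k: i for i, k in enumerate(["index", "model", "queries", "winner", "error"])}
--     return sorted(keys, key=lambda k: (rank.get(k, 5), k))
-- ===== Notes on version B (the rewrite author's own statement) =====
-- stated objective: simpler
-- what changed: Replaces A's two-phase construction (filter the preferred names present, then separately sort and append the remaining keys) by a single sorted() call over the whole key set with a composite key (rank-in-preferred-or-5, key-string).
import Mathlib
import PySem

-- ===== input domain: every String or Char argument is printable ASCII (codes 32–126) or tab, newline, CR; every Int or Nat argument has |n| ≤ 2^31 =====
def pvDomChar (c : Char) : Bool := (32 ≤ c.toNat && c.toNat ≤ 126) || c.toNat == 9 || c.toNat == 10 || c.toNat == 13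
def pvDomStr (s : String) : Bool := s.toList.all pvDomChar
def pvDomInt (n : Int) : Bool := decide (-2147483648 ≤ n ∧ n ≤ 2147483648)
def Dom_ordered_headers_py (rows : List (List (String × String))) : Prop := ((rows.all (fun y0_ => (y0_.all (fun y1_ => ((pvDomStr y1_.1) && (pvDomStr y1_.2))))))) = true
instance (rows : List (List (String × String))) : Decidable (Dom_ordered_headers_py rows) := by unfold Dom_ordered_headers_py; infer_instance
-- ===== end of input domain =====

-- B replaces A's two-phase construction (pull preferred columns, then sort and append the rest)
-- by one composite-key sort of the whole key set; same cost, simpler decomposition.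

-- ===== PORT A =====
def ordered_headers_py (rows : List (List (String × String))) : List String :=
  if rows = [] then []
  else
    -- keys = set(); for r in rows: keys.update(r.keys())
    let keys : PySem.Set String :=
      rows.foldl (fun s r => PySem.Set.update s (PySem.Dict.keys (PySem.Dict.ofList r))) PySem.Set.empty
    let preferred : List String := ["index", "model", "queries", "winner", "error"]
    -- cols = [k for k in preferred if k in keys]
    let cols : List String := preferred.filter (fun k => PySem.Set.contains keys k)
    -- rest = sorted([k for k in keys if k not in cols])  (identity key: result independent of set order)
    let rest : List String :=
      PySem.List.sorted (keys.filter (fun k => !(cols.contains k))) (fun k => k)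
    cols ++ rest

-- ===== PORT B =====
def ordered_headers_py_alt (rows : List (List (String × String))) : List String :=
  -- keys = {k for r in rows for k in r}
  let keys : PySem.Set String := PySem.Set.ofList (rows.flatMap (fun r => PySem.Dict.keys (PySem.Dict.ofList r)))
  -- rank = {k: i for i, k in enumerate([...])}
  let rank : PySem.Dict String Int :=
    (PySem.List.enumerate ["index", "model", "queries", "winner", "error"]).foldl
      (fun d p => PySem.Dict.insert d p.2 p.1) PySem.Dict.empty
  -- sorted(keys, key=lambda k: (rank.get(k, 5), k))  (injective composite key: set order irrelevant)
  PySem.List.sorted2 keys (fun k => PySem.Dict.getD rank k 5) (fun k => k)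

-- ===== PRECONDITION & SPEC =====
def Spec_ordered_headers_py (rows : List (List (String × String))) (out : List String) : Prop := out = ordered_headers_py_alt rows
instance (rows : List (List (String × String))) (out : List String) : Decidable (Spec_ordered_headers_py rows out) := by unfold Spec_ordered_headers_py; infer_instance

-- ===== CLAIM (what is proved, stated in full; the proofs are below) =====
def Claim_equal_ordered_headers_py : Prop := ∀ (rows : List (List (String × String))), Dom_ordered_headers_py rows → Spec_ordered_headers_py rows (ordered_headers_py rows)

-- ===== LEMMAS AND PROOFS =====

-- the concrete rank dictionary of B, and its composite key as a single lexicographic key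
def pvRank : PySem.Dict String Int :=
  (PySem.List.enumerate ["index", "model", "queries", "winner", "error"]).foldl
    (fun d p => PySem.Dict.insert d p.2 p.1) PySem.Dict.empty

def pvRankD (k : String) : Int := PySem.Dict.getD pvRank k 5

def pvLexKey (k : String) : Lex (Int × String) := toLex (pvRankD k, k)

-- sorted2 with linearly ordered key components is sorted with the lexicographic key
theorem pv_sorted2_eq_sorted_lex {α κ₁ κ₂ : Type} [LinearOrder κ₁] [LinearOrder κ₂]
    (xs : List α) (k1 : α → κ₁) (k2 : α → κ₂) :
    PySem.List.sorted2 xs k1 k2 = PySem.List.sorted xs (fun x => toLex (k1 x, k2 x)) := by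
  rw [PySem.List.sorted_eq_foldl_insertBy]
  show List.foldl _ [] xs = _
  congr 1
  funext acc x
  congr 1
  funext a b
  rcases lt_trichotomy (k1 a) (k1 b) with h | h | h
  · simp [h, Prod.Lex.lt_iff]
  · simp [h, Prod.Lex.lt_iff]
  · simp [h, lt_asymm h, h.ne', Prod.Lex.lt_iff]

-- A's set-building loop builds B's key set
theorem pv_keys_foldl (rows : List (List (String × String))) (s : PySem.Set String) :
    rows.foldl (fun s r => PySem.Set.update s (PySem.Dict.keys (PySem.Dict.ofList r))) s
      = (rows.flatMap (fun r => PySem.Dict.keys (PySem.Dict.ofList r))).foldl PySem.Set.add s := by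
  induction rows generalizing s with
  | nil => rfl
  | cons r t ih =>
    simp only [List.foldl_cons, List.flatMap_cons, List.foldl_append, PySem.Set.update]
    exact ih _

theorem pv_rankD_of_not_pref (k : String)
    (h : k ∉ (["index", "model", "queries", "winner", "error"] : List String)) :
    pvRankD k = 5 := by
  simp only [List.mem_cons, not_or] at h
  obtain ⟨h1, h2, h3, h4, h5, -⟩ := h
  have hR : pvRank = PySem.Dict.mk
      [("index", 0), ("model", 1), ("queries", 2), ("winner", 3), ("error", 4)] := by decide
  simp [pvRankD, hR, PySem.Dict.getD, PySem.Dict.get?, List.find?,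
    show ("index" == k) = false by simpa using (Ne.symm h1),
    show ("model" == k) = false by simpa using (Ne.symm h2),
    show ("queries" == k) = false by simpa using (Ne.symm h3),
    show ("winner" == k) = false by simpa using (Ne.symm h4),
    show ("error" == k) = false by simpa using (Ne.symm h5)]

theorem pv_rankD_le_of_pref (k : String)
    (h : k ∈ (["index", "model", "queries", "winner", "error"] : List String)) :
    pvRankD k ≤ 4 := by
  simp only [List.mem_cons, List.not_mem_nil, or_false] at h
  rcases h with rfl | rfl | rfl | rfl | rfl <;> decide

-- the main characterisation: sorting any duplicate-free key list by B's composite key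
-- yields A's "preferred columns first, then the rest sorted"
theorem pv_main (K : List String) (hnd : K.Nodup) :
    PySem.List.sorted K pvLexKey
      = (["index", "model", "queries", "winner", "error"] : List String).filter (fun k => K.contains k)
        ++ PySem.List.sorted
            (K.filter (fun k =>
              !(((["index", "model", "queries", "winner", "error"] : List String).filter
                  (fun k => K.contains k)).contains k)))
            (fun k => k) := by
  set pref : List String := ["index", "model", "queries", "winner", "error"] with hpref
  set cols : List String := pref.filter (fun k => K.contains k) with hcols
  set rest0 : List String := K.filter (fun k => !(cols.contains k)) with hrest0
  set rest : List String := PySem.List.sorted rest0 (fun k => k) with hrest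
  have hmem_cols : ∀ k, k ∈ cols ↔ k ∈ pref ∧ k ∈ K := by
    intro k; simp [hcols, List.mem_filter]
  have hmem_rest0 : ∀ k, k ∈ rest0 ↔ k ∈ K ∧ k ∉ pref := by
    intro k
    simp only [hrest0, List.mem_filter, Bool.not_eq_eq_eq_not, Bool.not_true,
      List.contains_eq_mem, decide_eq_false_iff_not]
    constructor
    · rintro ⟨hk, hnc⟩
      exact ⟨hk, fun hp => hnc ((hmem_cols k).mpr ⟨hp, hk⟩)⟩
    · rintro ⟨hk, hnp⟩
      exact ⟨hk, fun hc => hnp ((hmem_cols k).mp hc).1⟩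
  have hmem_rest : ∀ k, k ∈ rest ↔ k ∈ K ∧ k ∉ pref := by
    intro k; rw [hrest, PySem.List.mem_sorted]; exact hmem_rest0 k
  have hnd_cols : cols.Nodup := by
    apply List.Nodup.filter
    rw [hpref]; decide
  have hnd_rest0 : rest0.Nodup := hnd.filter _
  have hnd_rest : rest.Nodup := ((PySem.List.sorted_perm rest0 (fun k => k) false).nodup_iff).mpr hnd_rest0
  apply PySem.List.sorted_eq_of_perm_of_pairwise_lt
  · -- (cols ++ rest).Perm K
    have hnd_app : (cols ++ rest).Nodup := by
      rw [List.nodup_append]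
      refine ⟨hnd_cols, hnd_rest, ?_⟩
      intro a ha b hb
      rintro rfl
      exact ((hmem_rest a).mp hb).2 ((hmem_cols a).mp ha).1
    rw [List.perm_ext_iff_of_nodup hnd_app hnd]
    intro a
    simp only [List.mem_append, hmem_cols a, hmem_rest a]
    by_cases hp : a ∈ pref <;> by_cases hk : a ∈ K <;> simp [hp, hk]
  · -- Pairwise strict lex order
    rw [List.pairwise_append]
    refine ⟨?_, ?_, ?_⟩
    · apply List.Pairwise.filter
      rw [hpref]
      decide
    · have hle : rest.Pairwise (fun a b => a ≤ b) := by
        have := PySem.List.sorted_pairwise rest0 (fun k => k)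
        simpa [hrest] using this
      have hlt : rest.Pairwise (fun a b : String => a < b) :=
        (hle.and hnd_rest).imp (fun h => lt_of_le_of_ne h.1 h.2)
      apply hlt.imp_of_mem
      intro a b ha hb hab
      have hra : pvRankD a = 5 := pv_rankD_of_not_pref a ((hmem_rest a).mp ha).2
      have hrb : pvRankD b = 5 := pv_rankD_of_not_pref b ((hmem_rest b).mp hb).2
      simp [pvLexKey, Prod.Lex.lt_iff, hra, hrb, hab]
    · intro a ha b hb
      have hra : pvRankD a ≤ 4 := pv_rankD_le_of_pref a ((hmem_cols a).mp ha).1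
      have hrb : pvRankD b = 5 := pv_rankD_of_not_pref b ((hmem_rest b).mp hb).2
      simp only [pvLexKey, Prod.Lex.lt_iff, ofLex_toLex]
      left
      omega

-- ===== VERDICT (by name: the statement is the Claim_ definition above) =====
theorem ordered_headers_py_spec : Claim_equal_ordered_headers_py := by
  intro rows _
  unfold Spec_ordered_headers_py ordered_headers_py ordered_headers_py_alt
  by_cases hr : rows = []
  · subst hr; rfl
  · simp only [hr, if_false]
    rw [pv_keys_foldl]
    rw [show List.foldl PySem.Set.add PySem.Set.empty
          (rows.flatMap (fun r => PySem.Dict.keys (PySem.Dict.ofList r)))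
        = PySem.Set.ofList (rows.flatMap (fun r => PySem.Dict.keys (PySem.Dict.ofList r))) from rfl]
    rw [pv_sorted2_eq_sorted_lex]
    exact (pv_main _ (PySem.Set.nodup_ofList _)).symm
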